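-- pv_equiv track=rewrite | github.com/hyeyoungshin/makefile | solution.py | generate_command_sequence
-- ===== SOURCE A (Python) =====
-- def generate_command_sequence(makefile, target):
--     # look for target in the list
--     # if not there, return empty list
--     # else, get its dependencies
--     # generate command sequence for each dependency as target
--     def gcs_rec(makefile, target, visited):
--         if target not in makefile:
--             return []
--         else:
--             (dependencies, command) = makefile[target]
--
--             commands = []
--
--             for dependency in dependencies:
--                 if dependency not in visited:
--                     visited.append(dependency)
--                     commands += gcs_rec(makefile, dependency, visited)
--
--             return commands + [command]
--
--     return gcs_rec(makefile, target, [])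
-- ===== SOURCE B (Python) =====
-- def generate_command_sequence(makefile, target):
--     # Iterative DFS with an explicit stack of (kind, value) frames instead of recursion.
--     if target not in makefile:
--         return []
--     deps0, cmd0 = makefile[target]
--     out = []
--     visited = set()
--     stack = [('emit', cmd0)]
--     for d in reversed(deps0):
--         stack.append(('visit', d))
--     while stack:
--         kind, val = stack.pop()
--         if kind == 'emit':
--             out.append(val)
--         elif val not in visited:
--             visited.add(val)
--             if val in makefile:
--                 ddeps, dcmd = makefile[val]
--                 stack.append(('emit', dcmd))
--                 for d in reversed(ddeps):
--                     stack.append(('visit', d))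
--     return out
-- ===== Notes on version B (the rewrite author's own statement) =====
-- stated objective: alternative
-- what changed: Replaced the recursive DFS helper threading a mutable visited list with an iterative DFS over an explicit stack of visit/emit frames and a visited set, emitting commands in post-order.
import Mathlib
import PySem

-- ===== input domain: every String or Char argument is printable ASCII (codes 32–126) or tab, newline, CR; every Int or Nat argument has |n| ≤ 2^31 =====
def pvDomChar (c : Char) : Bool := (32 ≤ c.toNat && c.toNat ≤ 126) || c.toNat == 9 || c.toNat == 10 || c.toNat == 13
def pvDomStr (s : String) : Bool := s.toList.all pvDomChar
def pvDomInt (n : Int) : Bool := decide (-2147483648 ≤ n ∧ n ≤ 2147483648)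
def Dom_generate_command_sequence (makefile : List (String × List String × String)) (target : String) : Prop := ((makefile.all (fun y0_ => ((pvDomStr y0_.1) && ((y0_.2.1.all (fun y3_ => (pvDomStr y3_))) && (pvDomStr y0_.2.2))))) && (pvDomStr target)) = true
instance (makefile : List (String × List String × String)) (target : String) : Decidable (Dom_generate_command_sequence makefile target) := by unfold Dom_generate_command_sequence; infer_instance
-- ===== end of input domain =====

-- B replaces A's recursive DFS helper by an iterative DFS over an explicit frame stack
-- (objective: alternative decomposition, identical output).

-- first-match association-list lookup: exact port of Python's `target in makefile` /
-- `makefile[target]` (dict keys are unique, so first match is exact)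
def pvLookup : List (String × List String × String) → String → Option (List String × String)
  | [], _ => none
  | (k, v) :: rest, t => if k == t then some v else pvLookup rest t

-- number of makefile keys not yet visited: the termination measure of both DFSs
def pvMiss (mk : List (String × List String × String)) (v : List String) : Nat :=
  ((mk.map Prod.fst).filter (fun k => !v.contains k)).length

lemma pvContains_append_right {v : List String} (d : String) {x : String}
    (h : v.contains x = true) : (v ++ [d]).contains x = true := by
  simp only [List.contains_eq_mem, decide_eq_true_eq] at h ⊢
  exact List.mem_append_left _ h

lemma pvLookup_some_mem {mk : List (String × List String × String)} {d : String} {p}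
    (h : pvLookup mk d = some p) : d ∈ mk.map Prod.fst := by
  induction mk with
  | nil => simp [pvLookup] at h
  | cons e rest ih =>
    obtain ⟨k, w⟩ := e
    by_cases hk : k = d
    · simp [hk]
    · simp only [pvLookup, show (k == d) = false by simp [hk], Bool.false_eq_true, if_neg,
        not_false_iff] at h
      simp [ih h]

lemma pvLookup_none_not_mem {mk : List (String × List String × String)} {d : String}
    (h : pvLookup mk d = none) : d ∉ mk.map Prod.fst := by
  induction mk with
  | nil => simp
  | cons e rest ih =>
    obtain ⟨k, w⟩ := e
    by_cases hk : k = d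
    · simp [pvLookup, hk] at h
    · simp only [pvLookup, show (k == d) = false by simp [hk], Bool.false_eq_true, if_neg,
        not_false_iff] at h
      simp only [List.map_cons, List.mem_cons]
      rintro (h1 | h2)
      · exact hk h1.symm
      · exact ih h h2

lemma pvMiss_le (mk : List (String × List String × String)) (v w : List String)
    (h : ∀ x, v.contains x = true → w.contains x = true) : pvMiss mk w ≤ pvMiss mk v := by
  unfold pvMiss
  rw [← List.countP_eq_length_filter, ← List.countP_eq_length_filter]
  apply List.countP_mono_left
  intro a _ ha
  simp only [Bool.not_eq_eq_eq_not, Bool.not_true] at ha ⊢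
  cases hv : v.contains a with
  | false => rfl
  | true => rw [h a hv] at ha; cases ha

lemma pvMiss_append_nonkey (mk : List (String × List String × String)) (v : List String)
    (d : String) (hd : d ∉ mk.map Prod.fst) : pvMiss mk (v ++ [d]) = pvMiss mk v := by
  unfold pvMiss
  congr 1
  apply List.filter_congr
  intro k hk
  have hkd : k ≠ d := fun h => hd (h ▸ hk)
  simp [List.contains_eq_mem, hkd]

lemma pvMiss_append_key (mk : List (String × List String × String)) (v : List String)
    (d : String) (hd : d ∈ mk.map Prod.fst) (hv : v.contains d = false) :
    pvMiss mk (v ++ [d]) < pvMiss mk v := by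
  unfold pvMiss
  have hsplit : ((mk.map Prod.fst).filter (fun k => !(v ++ [d]).contains k)) =
      ((mk.map Prod.fst).filter (fun k => !v.contains k)).filter (fun k => !(k == d)) := by
    rw [List.filter_filter]
    apply List.filter_congr
    intro k _
    by_cases hkd : k = d
    · subst hkd; simp [List.contains_eq_mem]
    · simp [List.contains_eq_mem, hkd]
  rw [hsplit]
  apply List.length_filter_lt_length_iff_exists.mpr
  refine ⟨d, ?_, by simp⟩
  rw [List.mem_filter]
  refine ⟨hd, ?_⟩
  simp only [List.contains_eq_mem] at hv ⊢
  simp [hv]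

lemma pvContains_false_of_not {v : List String} {d : String}
    (hv : ¬ v.contains d = true) : v.contains d = false := by
  cases h : v.contains d
  · rfl
  · exact absurd h hv

-- ===== PORT A =====
-- A's gcs_rec(makefile, target, visited): lookup, loop over the dependencies, append the
-- command; the recursive call on a dependency is transcribed inline (its own lookup, loop
-- and command append) so that the mutated `visited` list can be threaded as state; the
-- subtype carries the "visited only grows" invariant needed for termination.
def gcsA (mk : List (String × List String × String)) :
    (deps : List String) → (acc : List String) → (v : List String) →
    { p : List String × List String // ∀ x, v.contains x = true → p.2.contains x = true }
  | [], acc, v => ⟨(acc, v), fun _ h => h⟩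
  | d :: rest, acc, v =>
    if hv : v.contains d then gcsA mk rest acc v
    else
      match hl : pvLookup mk d with
      | none =>
        let r := gcsA mk rest acc (v ++ [d])
        ⟨r.1, fun x hx => r.2 x (pvContains_append_right d hx)⟩
      | some (ddeps, dcmd) =>
        let r1 := gcsA mk ddeps [] (v ++ [d])
        let r2 := gcsA mk rest (acc ++ (r1.1.1 ++ [dcmd])) r1.1.2
        ⟨r2.1, fun x hx => r2.2 x (r1.2 x (pvContains_append_right d hx))⟩
  termination_by deps acc v => (pvMiss mk v, deps.length)
  decreasing_by
  · exact Prod.Lex.right _ (Nat.lt_succ_self _)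
  · have heq : pvMiss mk (v ++ [d]) = pvMiss mk v :=
      pvMiss_append_nonkey mk v d (pvLookup_none_not_mem hl)
    rw [heq]; exact Prod.Lex.right _ (Nat.lt_succ_self _)
  · exact Prod.Lex.left _ _
      (pvMiss_append_key mk v d (pvLookup_some_mem hl) (pvContains_false_of_not hv))
  · exact Prod.Lex.left _ _
      (lt_of_le_of_lt (pvMiss_le mk (v ++ [d]) r1.1.2 r1.2)
        (pvMiss_append_key mk v d (pvLookup_some_mem hl) (pvContains_false_of_not hv)))

def generate_command_sequence (makefile : List (String × List String × String)) (target : String) : List String :=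
  match pvLookup makefile target with
  | none => []
  | some (deps, cmd) => (gcsA makefile deps [] []).1.1 ++ [cmd]

-- ===== PORT B =====
inductive PvFrame
  | emit : String → PvFrame
  | visit : String → PvFrame
deriving DecidableEq, Repr

-- B's while-loop: the stack top is the list head (Python pops from the end, so pushing
-- reversed(deps) there is consing deps in order here)
def runB (mk : List (String × List String × String)) :
    List PvFrame → List String → PySem.Set String → List String
  | [], out, _ => out
  | .emit c :: st, out, vis => runB mk st (out ++ [c]) vis
  | .visit d :: st, out, vis =>
    if hv : PySem.Set.contains vis d then runB mk st out vis
    else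
      match hl : pvLookup mk d with
      | none => runB mk st out (PySem.Set.add vis d)
      | some (ddeps, dcmd) =>
        runB mk (ddeps.map PvFrame.visit ++ PvFrame.emit dcmd :: st) out (PySem.Set.add vis d)
  termination_by st out vis => (pvMiss mk vis, st.length)
  decreasing_by
  · exact Prod.Lex.right _ (Nat.lt_succ_self _)
  · exact Prod.Lex.right _ (Nat.lt_succ_self _)
  · have hadd : PySem.Set.add vis d = vis ++ [d] := if_neg hv
    have heq : pvMiss mk (vis ++ [d]) = pvMiss mk vis :=
      pvMiss_append_nonkey mk vis d (pvLookup_none_not_mem hl)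
    rw [hadd, heq]; exact Prod.Lex.right _ (Nat.lt_succ_self _)
  · have hadd : PySem.Set.add vis d = vis ++ [d] := if_neg hv
    rw [hadd]
    exact Prod.Lex.left _ _
      (pvMiss_append_key mk vis d (pvLookup_some_mem hl) (pvContains_false_of_not hv))

def generate_command_sequence_alt (makefile : List (String × List String × String)) (target : String) : List String :=
  match pvLookup makefile target with
  | none => []
  | some (deps, cmd) =>
    runB makefile (deps.map PvFrame.visit ++ [PvFrame.emit cmd]) [] PySem.Set.empty

-- ===== PRECONDITION & SPEC =====
def Spec_generate_command_sequence (makefile : List (String × List String × String)) (target : String) (out : List String) : Prop := out = generate_command_sequence_alt makefile target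
instance (makefile : List (String × List String × String)) (target : String) (out : List String) : Decidable (Spec_generate_command_sequence makefile target out) := by unfold Spec_generate_command_sequence; infer_instance

-- ===== CLAIM (what is proved, stated in full; the proofs are below) =====
def Claim_equal_generate_command_sequence : Prop := ∀ (makefile : List (String × List String × String)) (target : String), Dom_generate_command_sequence makefile target → Spec_generate_command_sequence makefile target (generate_command_sequence makefile target)

-- ===== LEMMAS AND PROOFS =====

-- one-step equations for the two worker functions
lemma gcsA_nil (mk : List (String × List String × String)) (acc v : List String) :
    (gcsA mk [] acc v).1 = (acc, v) := by
  rw [gcsA]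

lemma gcsA_cons_mem (mk : List (String × List String × String)) (d : String)
    (rest acc v : List String) (hv : v.contains d = true) :
    (gcsA mk (d :: rest) acc v).1 = (gcsA mk rest acc v).1 := by
  rw [gcsA, dif_pos hv]

lemma gcsA_cons_new_none (mk : List (String × List String × String)) (d : String)
    (rest acc v : List String) (hv : ¬ v.contains d = true) (hl : pvLookup mk d = none) :
    (gcsA mk (d :: rest) acc v).1 = (gcsA mk rest acc (v ++ [d])).1 := by
  rw [gcsA, dif_neg hv]
  split
  · rfl
  · rename_i dd dc heq2
    rw [hl] at heq2; simp at heq2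

lemma gcsA_cons_new_some (mk : List (String × List String × String)) (d : String)
    (rest acc v : List String) (ddeps : List String) (dcmd : String)
    (hv : ¬ v.contains d = true) (hl : pvLookup mk d = some (ddeps, dcmd)) :
    (gcsA mk (d :: rest) acc v).1 =
      (gcsA mk rest (acc ++ ((gcsA mk ddeps [] (v ++ [d])).1.1 ++ [dcmd]))
        (gcsA mk ddeps [] (v ++ [d])).1.2).1 := by
  rw [gcsA, dif_neg hv]
  split
  · rename_i heq2
    rw [hl] at heq2; simp at heq2
  · rename_i dd dc heq2
    rw [hl] at heq2
    simp only [Option.some.injEq, Prod.mk.injEq] at heq2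
    obtain ⟨h1, h2⟩ := heq2
    subst h1; subst h2
    rfl

lemma runB_nil (mk : List (String × List String × String)) (out : List String)
    (vis : PySem.Set String) : runB mk [] out vis = out := by
  rw [runB]

lemma runB_emit (mk : List (String × List String × String)) (c : String) (st : List PvFrame)
    (out : List String) (vis : PySem.Set String) :
    runB mk (.emit c :: st) out vis = runB mk st (out ++ [c]) vis := by
  rw [runB]

lemma runB_visit_mem (mk : List (String × List String × String)) (d : String)
    (st : List PvFrame) (out : List String) (vis : PySem.Set String)
    (hv : PySem.Set.contains vis d = true) :
    runB mk (.visit d :: st) out vis = runB mk st out vis := by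
  rw [runB, dif_pos hv]

lemma runB_visit_new_none (mk : List (String × List String × String)) (d : String)
    (st : List PvFrame) (out : List String) (vis : PySem.Set String)
    (hv : ¬ PySem.Set.contains vis d = true) (hl : pvLookup mk d = none) :
    runB mk (.visit d :: st) out vis = runB mk st out (vis ++ [d]) := by
  have hadd : PySem.Set.add vis d = vis ++ [d] := if_neg hv
  rw [runB, dif_neg hv]
  split
  · rw [hadd]
  · rename_i dd dc heq2
    rw [hl] at heq2; simp at heq2

lemma runB_visit_new_some (mk : List (String × List String × String)) (d : String)
    (st : List PvFrame) (out : List String) (vis : PySem.Set String)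
    (ddeps : List String) (dcmd : String)
    (hv : ¬ PySem.Set.contains vis d = true) (hl : pvLookup mk d = some (ddeps, dcmd)) :
    runB mk (.visit d :: st) out vis =
      runB mk (ddeps.map PvFrame.visit ++ PvFrame.emit dcmd :: st) out (vis ++ [d]) := by
  have hadd : PySem.Set.add vis d = vis ++ [d] := if_neg hv
  rw [runB, dif_neg hv]
  split
  · rename_i heq2
    rw [hl] at heq2; simp at heq2
  · rename_i dd dc heq2
    rw [hl] at heq2
    simp only [Option.some.injEq, Prod.mk.injEq] at heq2
    obtain ⟨h1, h2⟩ := heq2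
    subst h1; subst h2
    rw [hadd]

-- A's `commands` accumulator factors out
lemma gcsA_acc (mk : List (String × List String × String)) :
    ∀ (deps acc v : List String) (a : List String),
      (gcsA mk deps (a ++ acc) v).1 =
        (a ++ (gcsA mk deps acc v).1.1, (gcsA mk deps acc v).1.2) := by
  intro deps acc v
  induction deps, acc, v using gcsA.induct mk with
  | case1 acc v => intro a; simp [gcsA_nil]
  | case2 d rest acc v hv ih =>
    intro a; rw [gcsA_cons_mem mk d rest _ v hv, gcsA_cons_mem mk d rest acc v hv]; exact ih a
  | case3 d rest acc v hv hl ih =>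
    intro a
    rw [gcsA_cons_new_none mk d rest _ v hv hl, gcsA_cons_new_none mk d rest acc v hv hl]
    exact ih a
  | case4 d rest acc v hv ddeps dcmd hl r1 ih1 ih2 ih3 =>
    intro a
    rw [gcsA_cons_new_some mk d rest _ v ddeps dcmd hv hl,
        gcsA_cons_new_some mk d rest acc v ddeps dcmd hv hl, List.append_assoc]
    exact ih3 a

-- the stack machine simulates A's recursion: running the visit-frames of `deps` first
-- appends exactly A's commands for `deps` and leaves A's visited list
lemma runB_eq_gcsA (mk : List (String × List String × String)) :
    ∀ (deps acc v : List String), ∀ (out : List String) (st : List PvFrame),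
      runB mk (deps.map PvFrame.visit ++ st) out v =
        runB mk st (out ++ (gcsA mk deps [] v).1.1) (gcsA mk deps [] v).1.2 := by
  intro deps acc v
  induction deps, acc, v using gcsA.induct mk with
  | case1 acc v => intro out st; simp [gcsA_nil]
  | case2 d rest acc v hv ih =>
    intro out st
    rw [List.map_cons, List.cons_append, runB_visit_mem mk d _ out v hv, ih out st]
    have h := gcsA_cons_mem mk d rest [] v hv
    rw [h]
  | case3 d rest acc v hv hl ih =>
    intro out st
    rw [List.map_cons, List.cons_append, runB_visit_new_none mk d _ out v hv hl, ih out st]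
    have h := gcsA_cons_new_none mk d rest [] v hv hl
    rw [h]
  | case4 d rest acc v hv ddeps dcmd hl r1 ih1 ih2 ih3 =>
    intro out st
    rw [List.map_cons, List.cons_append, runB_visit_new_some mk d _ out v ddeps dcmd hv hl,
        ih1 out (PvFrame.emit dcmd :: (rest.map PvFrame.visit ++ st)), runB_emit,
        ih3 ((out ++ (gcsA mk ddeps [] (v ++ [d])).1.1) ++ [dcmd]) st]
    have h := gcsA_cons_new_some mk d rest [] v ddeps dcmd hv hl
    have h2 := gcsA_acc mk rest [] (gcsA mk ddeps [] (v ++ [d])).1.2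
      ((gcsA mk ddeps [] (v ++ [d])).1.1 ++ [dcmd])
    rw [h]
    simp only [List.nil_append]
    simp only [List.append_nil] at h2
    rw [h2]
    simp [List.append_assoc]

-- ===== VERDICT (by name: the statement is the Claim_ definition above) =====
theorem generate_command_sequence_spec : Claim_equal_generate_command_sequence := by
  intro mk t _
  unfold Spec_generate_command_sequence generate_command_sequence generate_command_sequence_alt
  cases hl : pvLookup mk t with
  | none => rfl
  | some p =>
    obtain ⟨deps, cmd⟩ := p
    show (gcsA mk deps [] []).1.1 ++ [cmd] =
      runB mk (deps.map PvFrame.visit ++ [PvFrame.emit cmd]) [] PySem.Set.empty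
    rw [show (PySem.Set.empty : PySem.Set String) = ([] : List String) from rfl,
        runB_eq_gcsA mk deps [] [] [] [PvFrame.emit cmd], runB_emit, runB_nil]
    simp
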